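-- pv_equiv track=rewrite | github.com/qingyu9243/LeetCode-CookBook | By Company/plaid_round1.py | create_routing_number_mapping
-- ===== SOURCE A (Python) =====
-- from typing import Dict, List, Tuple
-- from collections import defaultdict
--
-- def create_routing_number_mapping(rn_to_name: Dict[str, str], name_to_bank_id: List[Tuple[str, int]]):
--     dict_db2 = defaultdict(list)
--     res_dict = {}
--
--     # construct dict_db2 as flatten name_to_bank_id
--     for bank_name, bank_id in name_to_bank_id:
--         dict_db2[bank_name].append(bank_id)
--
--     # find bank name in rn_to_name and save bank id list to result dict
--     for routing_id, bank_name_rn in rn_to_name.items():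
--         if bank_name_rn in dict_db2:
--             res_dict[routing_id] = dict_db2[bank_name_rn]
--
--     return res_dict
-- ===== SOURCE B (Python) =====
-- def create_routing_number_mapping(rn_to_name, name_to_bank_id):
--     # One dict comprehension: for each routing number whose bank name occurs in
--     # the bank list, collect that name's bank ids by a direct scan of the list.
--     return {routing_id: [bid for n, bid in name_to_bank_id if n == bank_name]
--             for routing_id, bank_name in rn_to_name.items()
--             if any(n == bank_name for n, _ in name_to_bank_id)}
-- ===== Notes on version B (the rewrite author's own statement) =====
-- stated objective: simpler
-- what changed: Replaces A's defaultdict grouping pass plus membership-guarded second loop by a single dict comprehension that, per routing number, scans the bank list directly for matching names.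
import Mathlib
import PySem

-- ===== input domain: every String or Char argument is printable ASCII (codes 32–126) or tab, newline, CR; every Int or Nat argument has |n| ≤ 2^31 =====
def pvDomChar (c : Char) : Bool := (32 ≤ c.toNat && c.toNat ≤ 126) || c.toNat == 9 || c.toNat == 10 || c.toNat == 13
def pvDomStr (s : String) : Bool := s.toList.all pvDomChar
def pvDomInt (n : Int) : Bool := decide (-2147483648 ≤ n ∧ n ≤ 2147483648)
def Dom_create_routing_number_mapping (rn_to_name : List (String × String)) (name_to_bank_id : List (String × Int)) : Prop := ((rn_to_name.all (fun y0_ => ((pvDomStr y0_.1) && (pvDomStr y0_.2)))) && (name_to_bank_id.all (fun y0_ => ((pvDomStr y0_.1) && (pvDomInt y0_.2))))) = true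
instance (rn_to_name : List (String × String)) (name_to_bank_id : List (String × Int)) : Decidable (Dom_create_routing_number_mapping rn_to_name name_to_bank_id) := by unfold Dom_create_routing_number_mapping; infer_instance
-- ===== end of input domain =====

-- B replaces A's defaultdict grouping pass by a single dict comprehension that scans the
-- bank list directly per routing number (objective: simpler; not faster).

-- ===== PORT A =====
-- rn_to_name is a Python dict: the assoc list is decoded with dict semantics
-- (PySem.Dict.ofList: duplicate keys overwrite in place), then iterated via .items().
def create_routing_number_mapping (rn_to_name : List (String × String)) (name_to_bank_id : List (String × Int)) : List (String × List Int) :=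
  let rn := PySem.Dict.ofList rn_to_name
  -- dict_db2 = defaultdict(list); for bank_name, bank_id in name_to_bank_id: dict_db2[bank_name].append(bank_id)
  let dict_db2 := name_to_bank_id.foldl (fun d p => d.modify p.1 [] (fun l => l ++ [p.2])) PySem.Dict.empty
  -- for routing_id, bank_name_rn in rn_to_name.items(): if bank_name_rn in dict_db2: res_dict[routing_id] = dict_db2[bank_name_rn]
  let res_dict := rn.items.foldl (fun r p =>
      if dict_db2.contains p.2 then r.insert p.1 (dict_db2.getD p.2 []) else r) PySem.Dict.empty
  res_dict.items

-- ===== PORT B =====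
-- B's dict comprehension runs over the items of the dict rn_to_name, whose keys are
-- distinct, so the resulting dict's items are exactly this ordered filter + map.
def create_routing_number_mapping_alt (rn_to_name : List (String × String)) (name_to_bank_id : List (String × Int)) : List (String × List Int) :=
  ((PySem.Dict.ofList rn_to_name).items.filter
      (fun p => name_to_bank_id.any (fun q => q.1 == p.2))).map
    (fun p => (p.1, (name_to_bank_id.filter (fun q => q.1 == p.2)).map (fun q => q.2)))

-- ===== PRECONDITION & SPEC =====
def Spec_create_routing_number_mapping (rn_to_name : List (String × String)) (name_to_bank_id : List (String × Int)) (out : List (String × List Int)) : Prop := out = create_routing_number_mapping_alt rn_to_name name_to_bank_id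
instance (rn_to_name : List (String × String)) (name_to_bank_id : List (String × Int)) (out : List (String × List Int)) : Decidable (Spec_create_routing_number_mapping rn_to_name name_to_bank_id out) := by unfold Spec_create_routing_number_mapping; infer_instance

-- ===== CLAIM (what is proved, stated in full; the proofs are below) =====
def Claim_equal_create_routing_number_mapping : Prop := ∀ (rn_to_name : List (String × String)) (name_to_bank_id : List (String × Int)), Dom_create_routing_number_mapping rn_to_name name_to_bank_id → Spec_create_routing_number_mapping rn_to_name name_to_bank_id (create_routing_number_mapping rn_to_name name_to_bank_id)

-- ===== LEMMAS AND PROOFS =====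

-- A's second loop, generalized: a conditional-insert fold over pairs with distinct,
-- fresh keys appends exactly the filtered, mapped pairs to the accumulator's items.
lemma foldl_cond_insert_items (c : String × String → Bool) (v : String × String → List Int) :
    ∀ (L : List (String × String)) (r : PySem.Dict String (List Int)),
      (∀ p ∈ L, r.contains p.1 = false) → (L.map (·.1)).Nodup →
      (L.foldl (fun r p => if c p then r.insert p.1 (v p) else r) r).items
        = r.items ++ (L.filter c).map (fun p => (p.1, v p)) := by
  intro L
  induction L with
  | nil => intro r _ _; simp
  | cons a L ih =>
    intro r hfresh hnd
    simp only [List.map_cons, List.nodup_cons, List.mem_map] at hnd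
    by_cases hc : c a
    · have hfr : ∀ p ∈ L, (r.insert a.1 (v a)).contains p.1 = false := by
        intro p hp
        rw [PySem.Dict.contains_insert]
        have hne : p.1 ≠ a.1 := fun h => hnd.1 ⟨p, hp, h⟩
        simp [hne, hfresh p (List.mem_cons_of_mem a hp)]
      simp only [List.foldl_cons, hc, if_pos]
      rw [ih (r.insert a.1 (v a)) hfr hnd.2,
          PySem.Dict.items_insert_of_not_contains _ _ (hfresh a (List.mem_cons_self ..))]
      simp [hc]
    · simp only [List.foldl_cons, hc, if_neg, Bool.false_eq_true, not_false_iff]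
      rw [ih r (fun p hp => hfresh p (List.mem_cons_of_mem a hp)) hnd.2]
      simp [hc]

-- membership in A's defaultdict is membership among the bank names
lemma db2_contains (nb : List (String × Int)) (s : String) :
    (nb.foldl (fun d p => d.modify p.1 [] (fun l => l ++ [p.2])) PySem.Dict.empty).contains s
      = nb.any (fun q => q.1 == s) := by
  have hk := PySem.Dict.keys_foldl_modify_key nb (·.1) ([] : List Int)
      (fun d p l => l ++ [p.2]) PySem.Dict.empty
  rw [PySem.Dict.contains_eq_decide_mem_keys, hk, PySem.Dict.keys_empty, Bool.eq_iff_iff]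
  simp only [decide_eq_true_eq, PySem.Set.mem_update, List.not_mem_nil, false_or,
    List.mem_map, List.any_eq_true, beq_iff_eq]

-- ===== VERDICT (by name: the statement is the Claim_ definition above) =====
theorem create_routing_number_mapping_spec : Claim_equal_create_routing_number_mapping := by
  intro rn nb _
  unfold Spec_create_routing_number_mapping create_routing_number_mapping
    create_routing_number_mapping_alt
  have hnd : ((PySem.Dict.ofList rn).items.map (·.1)).Nodup := by
    simpa [PySem.Dict.keys] using PySem.Dict.nodup_keys_ofList (κ := String) (ν := String) rn
  rw [foldl_cond_insert_items _ _ _ _ (by simp [PySem.Dict.contains_empty]) hnd]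
  rw [show (PySem.Dict.empty : PySem.Dict String (List Int)).items = [] from rfl, List.nil_append]
  have hfe : (fun p : String × String =>
      (nb.foldl (fun d p => d.modify p.1 [] (fun l => l ++ [p.2])) PySem.Dict.empty).contains p.2)
      = (fun p : String × String => nb.any (fun q => q.1 == p.2)) := by
    funext p; exact db2_contains nb p.2
  rw [hfe]
  apply List.map_congr_left
  intro p _
  rw [PySem.Dict.getD_foldl_modify_append]
  simp
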